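-- pv_equiv track=rewrite | github.com/Ian-stone-shih/SmartRunML | src/map.py | des_asc
-- ===== SOURCE A (Python) =====
-- def des_asc(elevations):
--     # Calculate total ascent and descent
--     total_ascent = 0
--     total_descent = 0
--
--     for i in range(1, len(elevations)):
--         if elevations[i] > elevations[i - 1]:
--             total_ascent += elevations[i] - elevations[i - 1]
--         elif elevations[i] < elevations[i - 1]:
--             total_descent += elevations[i - 1] - elevations[i]
--
--     return total_ascent, total_descent
-- ===== SOURCE B (Python) =====
-- def des_asc(elevations):
--     # Closed-form identity: ascent - descent = last - first (telescoping),
--     # ascent + descent = total variation (sum of |deltas|); solve the 2x2 system.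
--     tv = sum(abs(b - a) for a, b in zip(elevations, elevations[1:]))
--     net = elevations[-1] - elevations[0] if elevations else 0
--     return (tv + net) // 2, (tv - net) // 2
-- ===== Notes on version B (the rewrite author's own statement) =====
-- stated objective: alternative
-- what changed: Replaces the fused sign-branching accumulating loop by an identity-based computation: total variation (sum of absolute deltas) and net change (last minus first) determine ascent and descent as (tv+net)/2 and (tv-net)/2, with no per-element sign branching.
import Mathlib
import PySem

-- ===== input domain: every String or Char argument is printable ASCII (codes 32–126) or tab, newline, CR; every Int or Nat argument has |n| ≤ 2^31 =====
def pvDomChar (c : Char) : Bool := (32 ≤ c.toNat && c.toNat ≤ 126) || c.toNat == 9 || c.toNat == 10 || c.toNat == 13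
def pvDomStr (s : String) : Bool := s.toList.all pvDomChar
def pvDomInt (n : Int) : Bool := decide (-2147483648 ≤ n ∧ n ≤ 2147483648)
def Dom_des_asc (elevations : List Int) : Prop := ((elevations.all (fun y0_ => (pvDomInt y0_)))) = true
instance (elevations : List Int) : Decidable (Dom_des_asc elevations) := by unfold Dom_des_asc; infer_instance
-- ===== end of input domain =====

-- B replaces A's fused sign-branching loop by the identity ascent+descent = total variation,
-- ascent-descent = last-first, recovering both totals by solving that 2x2 system (alternative, same cost).

-- ===== PORT A =====
def des_asc (elevations : List Int) : Int × Int :=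
  (PySem.List.pyRange 1 (PySem.List.len elevations) 1).foldl
    (fun (acc : Int × Int) i =>
      let cur := PySem.List.pyGetD elevations i 0
      let prev := PySem.List.pyGetD elevations (i - 1) 0
      if cur > prev then (acc.1 + (cur - prev), acc.2)
      else if cur < prev then (acc.1, acc.2 + (prev - cur))
      else acc)
    (0, 0)

-- ===== PORT B =====
def des_asc_alt (elevations : List Int) : Int × Int :=
  let tv := ((elevations.zip elevations.tail).map (fun p => |p.2 - p.1|)).sum
  let net := if _h : elevations ≠ [] then
      PySem.List.pyGetD elevations (-1) 0 - PySem.List.pyGetD elevations 0 0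
    else 0
  (PySem.Int.floordiv (tv + net) 2, PySem.Int.floordiv (tv - net) 2)

-- ===== PRECONDITION & SPEC =====
def Spec_des_asc (elevations : List Int) (out : Int × Int) : Prop := out = des_asc_alt elevations
instance (elevations : List Int) (out : Int × Int) : Decidable (Spec_des_asc elevations out) := by unfold Spec_des_asc; infer_instance

-- ===== CLAIM (what is proved, stated in full; the proofs are below) =====
def Claim_equal_des_asc : Prop := ∀ (elevations : List Int), Dom_des_asc elevations → Spec_des_asc elevations (des_asc elevations)

-- ===== LEMMAS AND PROOFS =====

-- A's index loop reads exactly the consecutive pairs (xs[i-1], xs[i]).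
theorem pv_idx_pairs (t : List Int) : ∀ x : Int,
    (PySem.List.pyRange 1 (PySem.List.len (x :: t)) 1).map
      (fun i => (PySem.List.pyGetD (x :: t) (i - 1) 0, PySem.List.pyGetD (x :: t) i 0))
    = (x :: t).zip t := by
  induction t with
  | nil =>
      intro x
      rw [PySem.List.pyRange_one_eq_nil (by simp)]
      simp
  | cons y t' ih =>
      intro x
      have hlen : PySem.List.len (x :: y :: t') = (1 : Int) + PySem.List.len (y :: t') := by
        simp only [PySem.List.len_eq, List.length_cons]; push_cast; omega
      rw [hlen, PySem.List.pyRange_one_cons (by simp only [PySem.List.len_eq, List.length_cons]; push_cast; omega)]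
      simp only [List.map_cons]
      have hshift : (PySem.List.pyRange (1 + 1) (1 + PySem.List.len (y :: t')) 1)
          = (PySem.List.pyRange 1 (PySem.List.len (y :: t')) 1).map (fun i => i + 1) := by
        rw [PySem.List.pyRange_one, PySem.List.pyRange_one]
        have : (1 + PySem.List.len (y :: t') - (1 + 1)).toNat = (PySem.List.len (y :: t') - 1).toNat := by
          omega
        rw [this, List.map_map]
        apply List.map_congr_left
        intro k _
        simp only [Function.comp]
        omega
      rw [hshift, List.map_map]
      have htail : ∀ i ∈ PySem.List.pyRange 1 (PySem.List.len (y :: t')) 1,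
          ((fun i => (PySem.List.pyGetD (x :: y :: t') (i - 1) 0,
              PySem.List.pyGetD (x :: y :: t') i 0)) ∘ (fun i => i + 1)) i
          = (fun i => (PySem.List.pyGetD (y :: t') (i - 1) 0,
              PySem.List.pyGetD (y :: t') i 0)) i := by
        intro i hi
        have hmem := (PySem.List.mem_pyRange_one).1 hi
        have h1 : (1 : Int) ≤ i := hmem.1
        have h2 : i < PySem.List.len (y :: t') := hmem.2
        simp only [Function.comp, Prod.mk.injEq]
        refine ⟨?_, ?_⟩
        · have e1 : i + 1 - 1 = ((i.toNat : Int)) := by omega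
          have e2 : i - 1 = (((i - 1).toNat : Int)) := by omega
          rw [e1, e2]
          simp only [PySem.List.pyGetD_natCast]
          have hk : i.toNat = (i - 1).toNat + 1 := by omega
          rw [hk]
          simp [List.getD]
        · have e1 : i + 1 = (((i.toNat + 1 : Nat) : Int)) := by omega
          have e2 : i = ((i.toNat : Int)) := by omega
          rw [e1]
          conv_rhs => rw [e2]
          simp only [PySem.List.pyGetD_natCast]
          simp [List.getD]
      rw [List.map_congr_left htail, ih y]
      have hx : PySem.List.pyGetD (x :: y :: t') (1 - 1) 0 = x := by
        norm_num [PySem.List.pyGetD_zero_cons]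
      have hy : PySem.List.pyGetD (x :: y :: t') 1 0 = y := by
        have : (1 : Int) = ((1 : Nat) : Int) := rfl
        rw [this, PySem.List.pyGetD_natCast]
        simp [List.getD]
      rw [hx, hy]
      rfl

-- Folding A's step over the pairs gives the two sign-filtered delta sums.
theorem pv_fold_pairs (ps : List (Int × Int)) : ∀ a d : Int,
    ps.foldl
      (fun (acc : Int × Int) p =>
        if p.2 > p.1 then (acc.1 + (p.2 - p.1), acc.2)
        else if p.2 < p.1 then (acc.1, acc.2 + (p.1 - p.2))
        else acc)
      (a, d)
    = (a + ((ps.map (fun p => p.2 - p.1)).filter (fun d => decide (0 < d))).sum,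
       d - ((ps.map (fun p => p.2 - p.1)).filter (fun d => decide (d < 0))).sum) := by
  induction ps with
  | nil => intro a d; simp
  | cons p ps ih =>
      intro a d
      simp only [List.foldl_cons, List.map_cons, List.filter_cons]
      by_cases h1 : p.2 > p.1
      · rw [if_pos h1, ih,
          if_pos (show decide ((0:Int) < p.2 - p.1) = true by simp; omega),
          if_neg (show ¬ decide (p.2 - p.1 < (0:Int)) = true by simp; omega)]
        simp only [List.sum_cons, Prod.mk.injEq]
        exact ⟨by ring, trivial⟩
      · rw [if_neg h1]
        by_cases h2 : p.2 < p.1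
        · rw [if_pos h2, ih,
            if_neg (show ¬ decide ((0:Int) < p.2 - p.1) = true by simp; omega),
            if_pos (show decide (p.2 - p.1 < (0:Int)) = true by simp; omega)]
          simp only [List.sum_cons, Prod.mk.injEq]
          exact ⟨trivial, by ring⟩
        · rw [if_neg h2, ih,
            if_neg (show ¬ decide ((0:Int) < p.2 - p.1) = true by simp; omega),
            if_neg (show ¬ decide (p.2 - p.1 < (0:Int)) = true by simp; omega)]

-- Sum and total variation decompose into the positive and negative filtered sums.
theorem pv_sum_split (ds : List Int) :
    ds.sum = ((ds.filter (fun d => decide (0 < d))).sum + (ds.filter (fun d => decide (d < 0))).sum)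
    ∧ (ds.map (fun d => |d|)).sum
      = ((ds.filter (fun d => decide (0 < d))).sum - (ds.filter (fun d => decide (d < 0))).sum) := by
  induction ds with
  | nil => simp
  | cons d ds ih =>
      obtain ⟨ih1, ih2⟩ := ih
      simp only [List.sum_cons, List.map_cons, List.filter_cons]
      rcases lt_trichotomy d 0 with h | h | h
      · rw [if_neg (by simp; omega), if_pos (by simp; omega)]
        constructor
        · simp only [List.sum_cons]; omega
        · simp only [List.sum_cons]
          rw [abs_of_neg h]; omega
      · subst h
        rw [if_neg (by simp), if_neg (by simp)]
        simpa using ⟨ih1, ih2⟩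
      · rw [if_pos (by simp; omega), if_neg (by simp; omega)]
        constructor
        · simp only [List.sum_cons]; omega
        · simp only [List.sum_cons]
          rw [abs_of_pos h]; omega

-- Consecutive deltas telescope to last minus first.
theorem pv_telescope (t : List Int) : ∀ x : Int,
    (((x :: t).zip t).map (fun p => p.2 - p.1)).sum = (x :: t).getLast (by simp) - x := by
  induction t with
  | nil => intro x; simp
  | cons y t' ih =>
      intro x
      simp only [List.zip_cons_cons, List.map_cons, List.sum_cons]
      rw [ih y]
      have : (x :: y :: t').getLast (by simp) = (y :: t').getLast (by simp) := by
        simp [List.getLast_cons]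
      rw [this]
      ring

-- Exact halving: floordiv of a doubled integer.
theorem pv_floordiv_double (k : Int) : PySem.Int.floordiv (2 * k) 2 = k := by
  rw [PySem.Int.floordiv_eq_ediv_of_pos (by norm_num)]
  omega

-- ===== VERDICT (by name: the statement is the Claim_ definition above) =====
theorem des_asc_spec : Claim_equal_des_asc := by
  intro xs _
  unfold Spec_des_asc des_asc des_asc_alt
  cases xs with
  | nil => rfl
  | cons x t =>
      rw [show (PySem.List.pyRange 1 (PySem.List.len (x :: t)) 1).foldl
          (fun (acc : Int × Int) i =>
            let cur := PySem.List.pyGetD (x :: t) i 0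
            let prev := PySem.List.pyGetD (x :: t) (i - 1) 0
            if cur > prev then (acc.1 + (cur - prev), acc.2)
            else if cur < prev then (acc.1, acc.2 + (prev - cur))
            else acc) (0, 0)
        = ((PySem.List.pyRange 1 (PySem.List.len (x :: t)) 1).map
            (fun i => (PySem.List.pyGetD (x :: t) (i - 1) 0, PySem.List.pyGetD (x :: t) i 0))).foldl
            (fun (acc : Int × Int) p =>
              if p.2 > p.1 then (acc.1 + (p.2 - p.1), acc.2)
              else if p.2 < p.1 then (acc.1, acc.2 + (p.1 - p.2))
              else acc) (0, 0)
        from (List.foldl_map (f := fun i => (PySem.List.pyGetD (x :: t) (i - 1) 0, PySem.List.pyGetD (x :: t) i 0)) (g := fun (acc : Int × Int) p => if p.2 > p.1 then (acc.1 + (p.2 - p.1), acc.2) else if p.2 < p.1 then (acc.1, acc.2 + (p.1 - p.2)) else acc)).symm]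
      rw [pv_idx_pairs t x, pv_fold_pairs]
      -- name the delta list and its two filtered sums
      set ps := (x :: t).zip t with hps
      set ds := ps.map (fun p => p.2 - p.1) with hds
      obtain ⟨hsum, habs⟩ := pv_sum_split ds
      -- B's tv is the total variation of ds
      have htv : List.map (fun p => |p.2 - p.1|) ((x :: t).zip t) = ds.map (fun d => |d|) := by
        simp [hds, hps, List.map_map, Function.comp_def]
      -- B's net is ds.sum (telescoping)
      have hlast : PySem.List.pyGetD (x :: t) (-1) 0 = (x :: t).getLast (by simp) :=
        PySem.List.pyGetD_neg_one (xs := x :: t) (d := 0) (by simp)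
      have hnet : PySem.List.pyGetD (x :: t) (-1) 0 - PySem.List.pyGetD (x :: t) 0 0 = ds.sum := by
        rw [hlast, PySem.List.pyGetD_zero_cons, hds, hps, pv_telescope t x]
      simp only [List.tail_cons, dif_pos (show (x :: t) ≠ ([] : List Int) by simp)]
      rw [htv, hnet, habs, hsum]
      have h1 : (ds.filter (fun d => decide (0 < d))).sum - (ds.filter (fun d => decide (d < 0))).sum
          + ((ds.filter (fun d => decide (0 < d))).sum + (ds.filter (fun d => decide (d < 0))).sum)
          = 2 * (ds.filter (fun d => decide (0 < d))).sum := by ring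
      have h2 : (ds.filter (fun d => decide (0 < d))).sum - (ds.filter (fun d => decide (d < 0))).sum
          - ((ds.filter (fun d => decide (0 < d))).sum + (ds.filter (fun d => decide (d < 0))).sum)
          = 2 * (-(ds.filter (fun d => decide (d < 0))).sum) := by ring
      rw [h1, h2, pv_floordiv_double, pv_floordiv_double]
      simp
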